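-- pv_equiv track=rewrite | github.com/victor201202/Lexer | src/Regex.py | abstract_S
-- ===== SOURCE A (Python) =====
-- def abstract_S(regex: str):
--     regex2 = str()
--     S = []
--     pos = regex.find('*')
--     if pos == -1:
--         return regex, S
--     regex2 = regex
--     while pos != -1:
--         S.append(regex2[pos - 1])
--         regex2 = regex2.replace(regex2[pos - 1: pos + 1], 'S', 1)
--         pos = regex2.find('*')
--     return regex2, S
-- ===== SOURCE B (Python) =====
-- def abstract_S(regex: str):
--     # One left-to-right pass: on '*' pop the preceding symbol, record it, push 'S'.
--     stack = []
--     S = []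
--     for c in regex:
--         if c == '*':
--             p = stack.pop()
--             S.append(p)
--             stack.append('S')
--         else:
--             stack.append(c)
--     return ''.join(stack), S
-- ===== Notes on version B (the rewrite author's own statement) =====
-- stated objective: alternative
-- what changed: Replaced the repeated find-and-string-replace loop (rescanning the string each iteration) with a single left-to-right stack pass that pops the symbol before each '*' and pushes 'S'; one pass and O(n) operations in place of one rescan per '*', though CPython's C-level find/replace makes A faster in wall time on typical inputs.
-- outside the precondition, e.g. on abstract_S('*a'): A returns ('Sa', ['a', 'S']), B raises IndexError; on abstract_S('*'): A returns ('S', ['*']), B raises IndexError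
import Mathlib
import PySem

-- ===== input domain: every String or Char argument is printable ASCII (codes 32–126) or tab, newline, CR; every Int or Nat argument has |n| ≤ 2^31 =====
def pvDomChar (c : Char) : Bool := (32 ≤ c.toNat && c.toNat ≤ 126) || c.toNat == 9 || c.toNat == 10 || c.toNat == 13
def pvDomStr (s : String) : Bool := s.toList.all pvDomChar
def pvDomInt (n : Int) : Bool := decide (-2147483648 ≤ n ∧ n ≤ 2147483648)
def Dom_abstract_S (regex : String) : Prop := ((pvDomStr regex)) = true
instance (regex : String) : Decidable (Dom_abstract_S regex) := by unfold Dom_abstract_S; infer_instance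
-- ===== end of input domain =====

-- B replaces A's repeated find/replace rescans with one left-to-right stack pass (a different algorithm, not measured faster).

-- ===== PORT A =====
-- s.replace(old, new, 1): replace the FIRST occurrence only (PySem.Chars.replace has no
-- count argument, so this one Python call is ported by hand, exact for count=1:
-- an empty `old` makes Python prepend `new` once; otherwise the leftmost occurrence is rewritten).
def pvReplace1Go (old new : List Char) : List Char → List Char
  | [] => []
  | c :: rest =>
    if old.isPrefixOf (c :: rest) then new ++ (c :: rest).drop old.length
    else c :: pvReplace1Go old new rest

def pvReplace1 (s old new : List Char) : List Char :=
  if old = [] then new ++ s else pvReplace1Go old new s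

-- the while loop of A; fuel bounds the iteration count (2*len+2 always suffices:
-- each iteration strictly decreases 2*(number of '*') + (1 if leading '*' else 0)),
-- so the fuel guard only makes the recursion structural and is never hit.
def pvLoopA : Nat → List Char → List String → List Char × List String
  | 0, l, S => (l, S)
  | fuel + 1, l, S =>
    let pos := PySem.Chars.find l ['*']
    if pos = -1 then (l, S)
    else
      match PySem.List.pyGet? l (pos - 1) with
      | none => (l, S)   -- IndexError; unreachable: l is nonempty whenever pos ≠ -1
      | some ch =>
        let sub := PySem.List.slice l (some (pos - 1)) (some (pos + 1))
        pvLoopA fuel (pvReplace1 l sub ['S']) (S ++ [String.ofList [ch]])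

def abstract_S (regex : String) : String × List String :=
  let l := regex.toList
  let pos := PySem.Chars.find l ['*']
  if pos = -1 then (regex, [])
  else
    let r := pvLoopA (2 * l.length + 2) l []
    (String.ofList r.1, r.2)

-- ===== PORT B =====
-- the for-loop of B: push each char; on '*' pop the top, record it, push 'S'.
-- `none` = the stack.pop() IndexError (empty stack, i.e. a leading '*').
def pvBGo : List Char → List Char → List String → Option (List Char × List String)
  | [], stack, S => some (stack, S)
  | c :: rest, stack, S =>
    if c = '*' then
      match PySem.List.pop? stack (-1) with
      | none => none
      | some (p, stack') => pvBGo rest (stack' ++ ['S']) (S ++ [String.ofList [p]])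
    else pvBGo rest (stack ++ [c]) S

def abstract_S_alt (regex : String) : String × List String :=
  match pvBGo regex.toList [] [] with
  | some (stack, S) => (String.ofList stack, S)
  | none => ("", [])   -- unreachable under Pre_ (Python B raises IndexError here)

-- ===== PRECONDITION & SPEC =====
-- Pre_ excludes strings beginning with '*': there A's value is an artefact of the empty
-- slice regex2[-1:1] (replace('','S',1) prepends; on '*' alone the slice wraps to the
-- whole string), and B's pop of an empty stack naturally raises IndexError.
def Pre_abstract_S (regex : String) : Prop := regex.toList.head? ≠ some '*'
instance (regex : String) : Decidable (Pre_abstract_S regex) := by unfold Pre_abstract_S; infer_instance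

def pvWitness_abstract_S : String := "ab*c*"

def Spec_abstract_S (regex : String) (out : String × List String) : Prop := out = abstract_S_alt regex
instance (regex : String) (out : String × List String) : Decidable (Spec_abstract_S regex out) := by unfold Spec_abstract_S; infer_instance

-- ===== CLAIM (what is proved, stated in full; the proofs are below) =====
def Claim_equal_abstract_S : Prop := ∀ (regex : String), Dom_abstract_S regex → Pre_abstract_S regex → Spec_abstract_S regex (abstract_S regex)

-- ===== LEMMAS AND PROOFS =====

-- B consumes a '*'-free block by just pushing it on the stack.
lemma pvBGo_starfree (u : List Char) (hu : '*' ∉ u) :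
    ∀ (rest stack : List Char) (S : List String),
      pvBGo (u ++ rest) stack S = pvBGo rest (stack ++ u) S := by
  induction u with
  | nil => intro rest stack S; simp
  | cons a u ih =>
    intro rest stack S
    have ha : a ≠ '*' := by intro h; exact hu (by simp [h])
    have hu' : '*' ∉ u := fun h => hu (by simp [h])
    simp only [List.cons_append, pvBGo, if_neg ha]
    rw [ih hu' rest (stack ++ [a]) S]
    simp

lemma pvBGo_nostar (l : List Char) (hl : '*' ∉ l) (stack : List Char) (S : List String) :
    pvBGo l stack S = some (stack ++ l, S) := by
  have := pvBGo_starfree l hl [] stack S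
  simpa [pvBGo] using this

-- one '*'-step of B, started on an explicit decomposition
lemma pvBGo_step (u v : List Char) (c : Char) (hu : '*' ∉ u) (hc : c ≠ '*')
    (stack : List Char) (S : List String) :
    pvBGo (u ++ c :: '*' :: v) stack S
      = pvBGo (u ++ 'S' :: v) stack (S ++ [String.ofList [c]]) := by
  have hu' : '*' ∉ u ++ [c] := by
    intro h; rcases List.mem_append.mp h with h | h
    · exact hu h
    · simp at h; exact hc h.symm
  have huS : '*' ∉ u ++ ['S'] := by
    intro h; rcases List.mem_append.mp h with h | h
    · exact hu h
    · simp at h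
  have h1 : u ++ c :: '*' :: v = (u ++ [c]) ++ '*' :: v := by simp
  have h2 : u ++ 'S' :: v = (u ++ ['S']) ++ v := by simp
  rw [h1, pvBGo_starfree (u ++ [c]) hu' ('*' :: v) stack S]
  rw [h2, pvBGo_starfree (u ++ ['S']) huS v stack (S ++ [String.ofList [c]])]
  have hpop : PySem.List.pop? ((stack ++ u) ++ [c]) (-1) = some (c, stack ++ u) := by
    simpa using PySem.List.pop?_last (stack ++ u) c
  simp only [pvBGo, ← List.append_assoc, hpop]
  simp

-- the hand-ported count-1 replace rewrites exactly the shown occurrence of [c,'*']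
lemma pvReplace1Go_spec (c : Char) (hc : c ≠ '*') :
    ∀ (u : List Char), '*' ∉ u → ∀ v,
      pvReplace1Go [c, '*'] ['S'] (u ++ c :: '*' :: v) = u ++ 'S' :: v := by
  intro u
  induction u with
  | nil =>
    intro _ v
    simp [pvReplace1Go, List.isPrefixOf]
  | cons a u ih =>
    intro hu v
    have hu' : '*' ∉ u := fun h => hu (by simp [h])
    have hnp : ¬ [c, '*'].isPrefixOf (a :: (u ++ c :: '*' :: v)) := by
      intro h
      rw [List.isPrefixOf_iff_prefix] at h
      rcases h with ⟨t, ht⟩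
      -- the second char of the list would be '*', but it lies in u ++ [c]
      have h2 : (u ++ c :: '*' :: v).head? = some '*' := by
        have := congrArg (fun l => l.tail.head?) ht
        simpa using this.symm
      cases u with
      | nil => simp at h2; exact hc h2
      | cons b u' => simp at h2; exact hu (by simp [h2])
    simp only [List.cons_append, pvReplace1Go, if_neg hnp]
    rw [ih hu' v]

-- find of '*' on a string with a '*'-free prefix
lemma find_star_eq (u v : List Char) (hu : '*' ∉ u) :
    PySem.Chars.find (u ++ '*' :: v) ['*'] = (u.length : Int) := by
  have hinf : ['*'] <:+: u ++ '*' :: v := ⟨u, v, by simp⟩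
  have hnn : 0 ≤ PySem.Chars.find (u ++ '*' :: v) ['*'] :=
    (PySem.Chars.find_nonneg_iff _ _).mpr hinf
  obtain ⟨hpre, hmin⟩ := PySem.Chars.find_spec (s := u ++ '*' :: v) (sub := ['*']) hnn
  set f := (PySem.Chars.find (u ++ '*' :: v) ['*']).toNat with hf
  have hle : u.length ≤ f := by
    by_contra h
    push_neg at h
    have : ['*'] <+: (u ++ '*' :: v).drop f := hpre
    rcases this with ⟨t, ht⟩
    have hget : (u ++ '*' :: v)[f]? = some '*' := by
      have := congrArg (fun l => l.head?) ht
      simpa [List.head?_drop] using this.symm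
    have : u[f]? = some '*' := by
      rwa [List.getElem?_append_left h] at hget
    exact hu (List.mem_of_getElem? this)
  have hge : f ≤ u.length := by
    by_contra h
    push_neg at h
    exact hmin u.length h ⟨v, by simp⟩
  have hfeq : f = u.length := le_antisymm hge hle
  have := Int.toNat_of_nonneg hnn
  omega

-- one iteration of A's while loop, on the explicit first-'*' decomposition
lemma loopA_step (u' v : List Char) (c : Char) (fuel : Nat) (S : List String)
    (hu' : '*' ∉ u') (hc : c ≠ '*') :
    pvLoopA (fuel + 1) (u' ++ c :: '*' :: v) S
      = pvLoopA fuel (u' ++ 'S' :: v) (S ++ [String.ofList [c]]) := by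
  have hu'c : '*' ∉ u' ++ [c] := by
    intro h; rcases List.mem_append.mp h with h | h
    · exact hu' h
    · simp at h; exact hc h.symm
  have hfind : PySem.Chars.find (u' ++ c :: '*' :: v) ['*'] = ((u'.length + 1 : Nat) : Int) := by
    have hl : u' ++ c :: '*' :: v = (u' ++ [c]) ++ '*' :: v := by simp
    rw [hl, find_star_eq (u' ++ [c]) v hu'c]
    simp
  have hne : ¬ ((u'.length + 1 : Nat) : Int) = -1 := by omega
  have hget : PySem.List.pyGet? (u' ++ c :: '*' :: v) (((u'.length + 1 : Nat) : Int) - 1)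
      = some c := by
    have h1 : ((u'.length + 1 : Nat) : Int) - 1 = ((u'.length : Nat) : Int) := by push_cast; ring
    rw [h1, PySem.List.pyGet?_natCast]
    simp
  have hslice : PySem.List.slice (u' ++ c :: '*' :: v)
      (some (((u'.length + 1 : Nat) : Int) - 1)) (some (((u'.length + 1 : Nat) : Int) + 1))
      = [c, '*'] := by
    have h1 : ((u'.length + 1 : Nat) : Int) - 1 = ((u'.length : Nat) : Int) := by push_cast; ring
    have h2 : ((u'.length + 1 : Nat) : Int) + 1 = ((u'.length : Nat) : Int) + ((2 : Nat) : Int) := by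
      push_cast; ring
    rw [h1, h2, PySem.List.slice_natCast_add]
    simp
  have hrep : pvReplace1 (u' ++ c :: '*' :: v) [c, '*'] ['S'] = u' ++ 'S' :: v := by
    rw [pvReplace1, if_neg (by simp)]
    exact pvReplace1Go_spec c hc u' hu' v
  conv_lhs => rw [pvLoopA]
  simp only [hfind, if_neg hne, hget, hslice, hrep]

-- main loop equivalence: with enough fuel, A's while loop computes exactly B's pass
lemma loopA_eq_BGo : ∀ (k fuel : Nat) (l : List Char) (S : List String),
    l.count '*' = k → k < fuel → l.head? ≠ some '*' →
    pvBGo l [] S = some (pvLoopA fuel l S) := by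
  intro k
  induction k with
  | zero =>
    intro fuel l S hcount hfuel _
    have hnostar : '*' ∉ l := by
      intro h
      have := List.count_pos_iff.mpr h
      omega
    obtain ⟨fuel', rfl⟩ : ∃ f, fuel = f + 1 := ⟨fuel - 1, by omega⟩
    have hfind : PySem.Chars.find l ['*'] = -1 := by
      rw [PySem.Chars.find_eq_neg_one_iff]
      intro hinf
      exact hnostar (hinf.mem (by simp))
    rw [pvLoopA]
    simp only [hfind, if_pos]
    simpa using pvBGo_nostar l hnostar [] S
  | succ k ih =>
    intro fuel l S hcount hfuel hhead
    have hmem : '*' ∈ l := List.count_pos_iff.mp (by omega)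
    obtain ⟨j, hj⟩ : ∃ j, PySem.List.index? l '*' = some j := by
      rcases Option.isSome_iff_exists.mp ((PySem.List.index?_isSome_iff l '*').mpr hmem) with ⟨j, hj⟩
      exact ⟨j, hj⟩
    obtain ⟨u, v, rfl, -, hu⟩ := (PySem.List.index?_eq_some_iff l '*' j).mp hj
    have hune : u ≠ [] := by
      rintro rfl
      exact hhead (by simp)
    obtain ⟨u', c, rfl⟩ : ∃ u' c, u = u' ++ [c] := ⟨u.dropLast, u.getLast hune, (List.dropLast_append_getLast hune).symm⟩
    have hc : c ≠ '*' := by intro h; exact hu (by simp [h])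
    have hu' : '*' ∉ u' := by intro h; exact hu (by simp [h])
    obtain ⟨fuel', rfl⟩ : ∃ f, fuel = f + 1 := ⟨fuel - 1, by omega⟩
    have hl : (u' ++ [c]) ++ '*' :: v = u' ++ c :: '*' :: v := by simp
    rw [hl]
    rw [loopA_step u' v c fuel' S hu' hc]
    rw [pvBGo_step u' v c hu' hc [] S]
    have hcount' : (u' ++ 'S' :: v).count '*' = k := by
      have h1 : (u' ++ c :: '*' :: v).count '*' = k + 1 := by rw [← hl]; exact hcount
      have hcu' : u'.count '*' = 0 := List.count_eq_zero.mpr hu'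
      simp [List.count_append, hc, hcu'] at h1 ⊢
      omega
    have hhead' : (u' ++ 'S' :: v).head? ≠ some '*' := by
      cases u' with
      | nil => simp
      | cons a u'' =>
        simp only [List.cons_append, List.head?_cons]
        intro h
        exact hu' (by simp [Option.some.inj h])
    exact ih fuel' (u' ++ 'S' :: v) (S ++ [String.ofList [c]]) hcount' (by omega) hhead'

theorem abstract_S_spec : Claim_equal_abstract_S := by
  intro regex _ hpre
  unfold Spec_abstract_S abstract_S abstract_S_alt
  by_cases hfind : PySem.Chars.find regex.toList ['*'] = -1
  · have hnostar : '*' ∉ regex.toList := by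
      intro h
      have : ['*'] <:+: regex.toList := by
        obtain ⟨s, t, heq⟩ := List.append_of_mem h
        exact ⟨s, t, by rw [heq]; simp⟩
      exact (PySem.Chars.find_eq_neg_one_iff _ _).mp hfind this
    rw [if_pos hfind, pvBGo_nostar regex.toList hnostar [] []]
    simp [String.ofList_toList]
  · rw [if_neg hfind]
    have hk : regex.toList.count '*' < 2 * regex.toList.length + 2 := by
      have := List.count_le_length (a := '*') (l := regex.toList)
      omega
    rw [loopA_eq_BGo (regex.toList.count '*') (2 * regex.toList.length + 2)
      regex.toList [] rfl hk hpre]
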